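-- pv_equiv track=rewrite | github.com/constructomech/AoC | ai/2024/day_09/2/dsr1.py | find_leftmost_space
-- ===== SOURCE A (Python) =====
-- def find_leftmost_space(disk, start, required_length):
--     current_run_start = -1
--     current_run_length = 0
--     for i in range(start):
--         if disk[i] == '.':
--             if current_run_start == -1:
--                 current_run_start = i
--             current_run_length += 1
--             if current_run_length >= required_length:
--                 return current_run_start
--         else:
--             current_run_start = -1
--             current_run_length = 0
--     # Check if there's a valid run after the loop
--     if current_run_length >= required_length:
--         return current_run_start
--     return -1
-- ===== SOURCE B (Python) =====
-- def find_leftmost_space(disk, start, required_length):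
--     # Build a table of all maximal '.' runs in the prefix, then query it.
--     prefix = disk[:start] if start > 0 else []
--     runs = []
--     run_start = None
--     for i, c in enumerate(prefix):
--         if c == '.':
--             if run_start is None:
--                 run_start = i
--         else:
--             if run_start is not None:
--                 runs.append((run_start, i - run_start))
--                 run_start = None
--     if run_start is not None:
--         runs.append((run_start, len(prefix) - run_start))
--     for s, l in runs:
--         if l >= required_length:
--             return s
--     return -1
-- ===== Notes on version B (the rewrite author's own statement) =====
-- stated objective: alternative
-- what changed: Replaces A's single early-returning scan with state-reset by a build-then-query decomposition: one pass over the prefix collects all maximal '.'-runs as (start,length) pairs (flushing the trailing run), then the table is queried for the first run of sufficient length.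
-- outside the precondition, e.g. on find_leftmost_space(['.'], 2, 1): A returns 0, B returns 0
-- crash fix: When start > len(disk) and disk contains no run of max(required_length,1) consecutive '.' cells, A's scan runs past the end and raises IndexError; B scans only the existing prefix disk[:start] and returns -1 (or the first adequate run's start). — e.g. on find_leftmost_space(["x"], 3, 1): A raises IndexError, B returns -1
import Mathlib
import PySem

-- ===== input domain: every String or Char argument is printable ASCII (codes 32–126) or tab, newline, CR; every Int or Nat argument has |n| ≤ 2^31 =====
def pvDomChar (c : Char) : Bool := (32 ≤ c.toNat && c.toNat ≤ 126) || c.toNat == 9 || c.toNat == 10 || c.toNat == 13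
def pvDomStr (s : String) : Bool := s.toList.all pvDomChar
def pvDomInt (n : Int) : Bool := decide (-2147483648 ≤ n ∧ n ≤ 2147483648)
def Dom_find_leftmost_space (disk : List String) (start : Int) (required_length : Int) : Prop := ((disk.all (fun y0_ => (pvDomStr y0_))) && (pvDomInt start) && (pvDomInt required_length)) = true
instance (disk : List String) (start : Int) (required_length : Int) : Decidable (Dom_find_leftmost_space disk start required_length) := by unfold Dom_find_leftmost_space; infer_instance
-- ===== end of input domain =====

-- B replaces A's early-returning scan by a build-a-run-table-then-query decomposition (same cost, alternative structure).

-- ===== PORT A =====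
-- A's for-loop 'for i in range(start)' with early return, as index recursion from 0 to start;
-- disk[i] is pyGet?: 'none' is Python's IndexError point (those inputs lie outside Pre_) and the
-- recursion stops there, so no value is claimed for them.
def fls_loop (disk : List String) (required_length : Int) (stop : Int) (i : Int) (crs : Int) (crl : Int) : Int :=
  if h : i < stop then
    match PySem.List.pyGet? disk i with
    | none => -1
    | some c =>
      if c = "." then
        let crs' := if crs = -1 then i else crs
        let crl' := crl + 1
        if required_length ≤ crl' then crs'
        else fls_loop disk required_length stop (i + 1) crs' crl'
      else fls_loop disk required_length stop (i + 1) (-1) 0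
  else if required_length ≤ crl then crs else -1
termination_by (stop - i).toNat
decreasing_by all_goals omega

def find_leftmost_space (disk : List String) (start : Int) (required_length : Int) : Int :=
  fls_loop disk required_length start 0 (-1) 0

-- ===== PORT B =====
def find_leftmost_space_alt (disk : List String) (start : Int) (required_length : Int) : Int :=
  let pre := if 0 < start then PySem.List.slice disk (some 0) (some start) else []
  let st := (PySem.List.enumerate pre 0).foldl
      (fun (st : List (Int × Int) × Option Int) ic =>
        if ic.2 = "." then
          (st.1, match st.2 with | none => some ic.1 | some s => some s)
        else
          match st.2 with
          | some s => (st.1 ++ [(s, ic.1 - s)], none)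
          | none => (st.1, none))
      ([], none)
  let runs := match st.2 with
    | some s => st.1 ++ [(s, (pre.length : Int) - s)]
    | none => st.1
  match runs.find? (fun p => required_length ≤ p.2) with
  | some p => p.1
  | none => -1

-- ===== PRECONDITION & SPEC =====
-- Pre_ excludes start > len(disk): there A's scan may run past the end of disk (it raises
-- IndexError unless an early return triggers first, so a few returning inputs are excluded too).
def Pre_find_leftmost_space (disk : List String) (start : Int) (required_length : Int) : Prop :=
  start ≤ (disk.length : Int)
instance (disk : List String) (start : Int) (required_length : Int) : Decidable (Pre_find_leftmost_space disk start required_length) := by unfold Pre_find_leftmost_space; infer_instance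

def pvWitness_find_leftmost_space : List String × Int × Int := (["1", ".", ".", "2"], 4, 2)

-- When start > len(disk) and disk has no run of max(required_length,1) consecutive '.' cells,
-- A raises IndexError; B scans only the existing prefix and returns a value.
def Raises_find_leftmost_space (disk : List String) (start : Int) (required_length : Int) : Prop :=
  (disk.length : Int) < start ∧
  ¬ ∃ k < disk.length, (((disk.drop k).take (max required_length 1).toNat).length
      = (max required_length 1).toNat
    ∧ ∀ x ∈ (disk.drop k).take (max required_length 1).toNat, x = ".")
instance (disk : List String) (start : Int) (required_length : Int) : Decidable (Raises_find_leftmost_space disk start required_length) := by unfold Raises_find_leftmost_space; infer_instance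
def pvRaiseWitness_find_leftmost_space : List String × Int × Int := (["x"], 3, 1)
def pvRaiseWitnessOut_find_leftmost_space : Int := -1

def Spec_find_leftmost_space (disk : List String) (start : Int) (required_length : Int) (out : Int) : Prop := out = find_leftmost_space_alt disk start required_length
instance (disk : List String) (start : Int) (required_length : Int) (out : Int) : Decidable (Spec_find_leftmost_space disk start required_length out) := by unfold Spec_find_leftmost_space; infer_instance

-- ===== CLAIM (what is proved, stated in full; the proofs are below) =====
def Claim_equal_find_leftmost_space : Prop := ∀ (disk : List String) (start : Int) (required_length : Int), Dom_find_leftmost_space disk start required_length → Pre_find_leftmost_space disk start required_length → Spec_find_leftmost_space disk start required_length (find_leftmost_space disk start required_length)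
def Claim_raises_find_leftmost_space : Prop := (∀ (disk : List String) (start : Int) (required_length : Int), Dom_find_leftmost_space disk start required_length → Raises_find_leftmost_space disk start required_length → ¬ Pre_find_leftmost_space disk start required_length) ∧ (Dom_find_leftmost_space (pvRaiseWitness_find_leftmost_space.1) (pvRaiseWitness_find_leftmost_space.2.1) (pvRaiseWitness_find_leftmost_space.2.2) ∧ Raises_find_leftmost_space (pvRaiseWitness_find_leftmost_space.1) (pvRaiseWitness_find_leftmost_space.2.1) (pvRaiseWitness_find_leftmost_space.2.2) ∧ find_leftmost_space_alt (pvRaiseWitness_find_leftmost_space.1) (pvRaiseWitness_find_leftmost_space.2.1) (pvRaiseWitness_find_leftmost_space.2.2) = pvRaiseWitnessOut_find_leftmost_space)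

-- ===== LEMMAS AND PROOFS =====

-- A's loop re-expressed as recursion on the prefix list itself (index i carried along).
def arun (req : Int) : List String → Int → Int → Int → Int
  | [], _, crs, crl => if req ≤ crl then crs else -1
  | c :: t, i, crs, crl =>
    if c = "." then
      let crs' := if crs = -1 then i else crs
      let crl' := crl + 1
      if req ≤ crl' then crs' else arun req t (i + 1) crs' crl'
    else arun req t (i + 1) (-1) 0

-- B's run-collection loop (fold + flush) as recursion on the prefix list.
def collect : List String → Int → Option Int → List (Int × Int) → List (Int × Int)
  | [], i, rs, runs => match rs with | some s => runs ++ [(s, i - s)] | none => runs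
  | c :: t, i, rs, runs =>
    if c = "." then collect t (i + 1) (match rs with | none => some i | some s => some s) runs
    else match rs with
      | some s => collect t (i + 1) none (runs ++ [(s, i - s)])
      | none => collect t (i + 1) none runs

def query (req : Int) (runs : List (Int × Int)) : Int :=
  match runs.find? (fun p => req ≤ p.2) with
  | some p => p.1
  | none => -1

theorem collect_append (t : List String) : ∀ (i : Int) (rs : Option Int) (runs : List (Int × Int)),
    collect t i rs runs = runs ++ collect t i rs [] := by
  induction t with
  | nil => intro i rs runs; cases rs <;> simp [collect]
  | cons c t ih =>
    intro i rs runs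
    by_cases hc : c = "."
    · simp only [collect, if_pos hc]
      exact ih _ _ _
    · cases rs with
      | none => simp only [collect, if_neg hc]; exact ih _ _ _
      | some s =>
        simp only [collect, if_neg hc]
        rw [ih (i + 1) none (runs ++ [(s, i - s)]), ih (i + 1) none ([] ++ [(s, i - s)])]
        simp

theorem query_cons_neg (req : Int) (s v : Int) (rest : List (Int × Int)) (h : ¬ req ≤ v) :
    query req ((s, v) :: rest) = query req rest := by
  simp [query, List.find?, h]

theorem query_cons_pos (req : Int) (s v : Int) (rest : List (Int × Int)) (h : req ≤ v) :
    query req ((s, v) :: rest) = s := by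
  simp [query, List.find?, h]

-- If the open run is already long enough, the query answers its start.
theorem query_collect_open (req : Int) (t : List String) : ∀ (i s : Int), req ≤ i - s →
    query req (collect t i (some s) []) = s := by
  induction t with
  | nil => intro i s h; simp [collect, query, h]
  | cons c t ih =>
    intro i s h
    by_cases hc : c = "."
    · simp only [collect, if_pos hc]
      exact ih (i + 1) s (by omega)
    · simp only [collect, if_neg hc]
      rw [collect_append]
      simpa using query_cons_pos req s (i - s) _ h

-- Main invariant: A's scan state corresponds to B's open run, and the answer agrees.
theorem arun_eq_query (req : Int) (t : List String) : ∀ (i crs crl : Int) (rs : Option Int),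
    0 ≤ i →
    (rs = none → crs = -1 ∧ crl = 0) →
    (∀ s, rs = some s → crs = s ∧ crl = i - s ∧ 0 ≤ s ∧ crl < req) →
    arun req t i crs crl = query req (collect t i rs []) := by
  induction t with
  | nil =>
    intro i crs crl rs hi hn hs
    cases rs with
    | none =>
      obtain ⟨h1, h2⟩ := hn rfl
      subst h1; subst h2
      simp [arun, collect, query]
    | some s =>
      obtain ⟨h1, h2, _, _⟩ := hs s rfl
      rw [h1, h2]
      simp only [arun, collect, List.nil_append, query, List.find?]
      by_cases h : req ≤ i - s <;> simp [h]
  | cons c t ih =>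
    intro i crs crl rs hi hn hs
    by_cases hc : c = "."
    · cases rs with
      | none =>
        obtain ⟨h1, h2⟩ := hn rfl
        subst h1; subst h2
        simp only [arun, collect, if_pos hc]
        by_cases hr : req ≤ 0 + 1
        · rw [if_pos hr, query_collect_open req t (i + 1) i (by omega)]
          simp
        · rw [if_neg hr]
          exact ih (i + 1) i (0 + 1) (some i) (by omega) (by simp)
            (fun s hsi => by cases hsi; exact ⟨rfl, by omega, hi, by omega⟩)
      | some s =>
        obtain ⟨h1, h2, h3, h4⟩ := hs s rfl
        have hne : ¬ s = -1 := by omega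
        rw [h1, h2]
        simp only [arun, collect, if_pos hc, if_neg hne]
        by_cases hr : req ≤ (i - s) + 1
        · rw [if_pos hr, query_collect_open req t (i + 1) s (by omega)]
        · rw [if_neg hr]
          exact ih (i + 1) s ((i - s) + 1) (some s) (by omega) (by simp)
            (fun s' hsi => by cases hsi; exact ⟨rfl, by omega, h3, by omega⟩)
    · cases rs with
      | none =>
        simp only [arun, collect, if_neg hc]
        exact ih (i + 1) (-1) 0 none (by omega) (fun _ => ⟨rfl, rfl⟩) (by simp)
      | some s =>
        obtain ⟨h1, h2, h3, h4⟩ := hs s rfl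
        rw [h1, h2]
        simp only [arun, collect, if_neg hc]
        rw [collect_append, List.nil_append, List.cons_append, List.nil_append,
          query_cons_neg req s (i - s) _ (by omega)]
        exact ih (i + 1) (-1) 0 none (by omega) (fun _ => ⟨rfl, rfl⟩) (by simp)

-- Port A's index loop equals arun on the prefix list.
theorem fls_loop_eq_arun (disk : List String) (req : Int) (l : List String) :
    ∀ (i : Int) (crs crl : Int), 0 ≤ i →
    (∀ (k : Nat) (h : k < l.length), PySem.List.pyGet? disk (i + (k : Int)) = some l[k]) →
    fls_loop disk req (i + (l.length : Int)) i crs crl = arun req l i crs crl := by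
  induction l with
  | nil =>
    intro i crs crl hi _
    rw [fls_loop]
    simp [arun]
  | cons c t ih =>
    intro i crs crl hi hidx
    have h0 : PySem.List.pyGet? disk i = some c := by
      have := hidx 0 (by simp)
      simpa using this
    have hrest : i + ((c :: t).length : Int) = (i + 1) + (t.length : Int) := by
      simp only [List.length_cons]; push_cast; ring
    have hidx' : ∀ (k : Nat) (h : k < t.length),
        PySem.List.pyGet? disk (i + 1 + (k : Int)) = some t[k] := by
      intro k h
      have := hidx (k + 1) (by simpa using Nat.succ_lt_succ h)
      simpa [add_assoc, add_comm, add_left_comm] using this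
    rw [fls_loop]
    rw [dif_pos (by simp only [List.length_cons]; push_cast; omega), h0]
    simp only [arun]
    by_cases hc : c = "."
    · simp only [if_pos hc]
      by_cases hr : req ≤ crl + 1
      · simp [hr]
      · simp only [if_neg hr]
        rw [hrest]
        exact ih (i + 1) _ _ (by omega) hidx'
    · simp only [if_neg hc]
      rw [hrest]
      exact ih (i + 1) (-1) 0 (by omega) hidx'

-- B's enumerate-fold (plus flush) equals collect.
theorem foldl_flush_eq_collect (l : List String) : ∀ (i : Int) (rs : Option Int) (runs : List (Int × Int)) (e : Int), e = i + (l.length : Int) →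
    (let st := (PySem.List.enumerate l i).foldl
        (fun (st : List (Int × Int) × Option Int) ic =>
          if ic.2 = "." then
            (st.1, match st.2 with | none => some ic.1 | some s => some s)
          else
            match st.2 with
            | some s => (st.1 ++ [(s, ic.1 - s)], none)
            | none => (st.1, none))
        (runs, rs)
     match st.2 with
     | some s => st.1 ++ [(s, e - s)]
     | none => st.1)
    = collect l i rs runs := by
  induction l with
  | nil =>
    intro i rs runs e he
    have : e = i := by simpa using he
    subst this
    cases rs <;> simp [PySem.List.enumerate_nil, collect]
  | cons c t ih =>
    intro i rs runs e he
    have he' : e = (i + 1) + (t.length : Int) := by simp only [List.length_cons] at he; push_cast at he ⊢; omega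
    rw [PySem.List.enumerate_cons]
    by_cases hc : c = "."
    · cases rs with
      | none =>
        simp only [List.foldl_cons, hc, collect]
        exact ih (i + 1) (some i) runs e he'
      | some s =>
        simp only [List.foldl_cons, hc, collect]
        exact ih (i + 1) (some s) runs e he'
    · cases rs with
      | none =>
        simp only [List.foldl_cons, if_neg hc, collect]
        exact ih (i + 1) none runs e he'
      | some s =>
        simp only [List.foldl_cons, if_neg hc, collect]
        exact ih (i + 1) none (runs ++ [(s, i - s)]) e he'

-- ===== VERDICT (by name: the statement is the Claim_ definition above) =====
theorem find_leftmost_space_spec : Claim_equal_find_leftmost_space := by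
  intro disk start req _ hpre
  have hpre' : start ≤ (disk.length : Int) := hpre
  unfold Spec_find_leftmost_space find_leftmost_space find_leftmost_space_alt
  by_cases hs : 0 < start
  · have hslice : PySem.List.slice disk (some 0) (some start) = disk.take start.toNat := by
      rw [PySem.List.slice_toNat disk (by omega) (by omega)]
      simp
    set l : List String := disk.take start.toNat with hl
    have hlen : l.length = start.toNat := by
      rw [hl, List.length_take]
      omega
    have hA : fls_loop disk req start 0 (-1) 0 = arun req l 0 (-1) 0 := by
      have hb := fls_loop_eq_arun disk req l 0 (-1) 0 le_rfl (by
        intro k h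
        have hk : k < disk.length := by rw [hlen] at h; omega
        have hlk : l[k] = disk[k] := by
          simp [hl]
        rw [hlk]
        simp [PySem.List.pyGet?, PySem.List.pyIdx?, hk])
      rw [← hb]
      congr 2
      rw [hlen]
      omega
    rw [hA]
    simp only [if_pos hs, hslice]
    rw [foldl_flush_eq_collect l 0 none [] (l.length : Int) (by ring)]
    exact arun_eq_query req l 0 (-1) 0 none le_rfl (fun _ => ⟨rfl, rfl⟩) (by simp)
  · rw [fls_loop]
    rw [dif_neg (by omega)]
    simp only [if_neg hs, PySem.List.enumerate_nil, List.foldl_nil]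
    simp [query, List.find?]

@[simp]
theorem find_leftmost_space_raises : Claim_raises_find_leftmost_space := by
  unfold Claim_raises_find_leftmost_space
  constructor
  · intro disk start req _ hr hpre
    unfold Raises_find_leftmost_space at hr
    unfold Pre_find_leftmost_space at hpre
    omega
  · refine ⟨by decide, by decide, by decide⟩
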